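-- pv_equiv track=rewrite | github.com/ValentynaK17/python-challenge | PyPoll/main.py | max_Positives
-- ===== SOURCE A (Python) =====
-- def max_Positives (list_input):
--     max_positive=0
--     max_items_count=0 #in case all elements are equal or there are no positive items or list is empty
--     #looking for a max, by comparing temporary max, with list's elements and selecting the bigger one as new max
--     for i in range(len(list_input)):
--         if list_input[i]>0 and list_input[i]>max_positive: #skip list item=0, as it is not a positive one (profit), same for item<0
--             max_positive=list_input[i]
--     #find the count of max values
--     for i in range(len(list_input)):
--         if max_positive!=0 and list_input[i]==max_positive:
--             max_items_count+=1
--     return max_positive, max_items_count #max_position is empty list if no positive items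
-- ===== SOURCE B (Python) =====
-- def max_Positives(list_input):
--     max_positive = 0
--     max_items_count = 0
--     for x in list_input:
--         if x > 0 and x > max_positive:
--             max_positive = x
--             max_items_count = 1
--         elif max_positive != 0 and x == max_positive:
--             max_items_count += 1
--     return max_positive, max_items_count
-- ===== Notes on version B (the rewrite author's own statement) =====
-- stated objective: faster
-- what changed: Fuses A's two index-based passes (find max positive, then count it) into a single value loop maintaining (max_positive, count), resetting the count to 1 whenever a new maximum appears.
import Mathlib
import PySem

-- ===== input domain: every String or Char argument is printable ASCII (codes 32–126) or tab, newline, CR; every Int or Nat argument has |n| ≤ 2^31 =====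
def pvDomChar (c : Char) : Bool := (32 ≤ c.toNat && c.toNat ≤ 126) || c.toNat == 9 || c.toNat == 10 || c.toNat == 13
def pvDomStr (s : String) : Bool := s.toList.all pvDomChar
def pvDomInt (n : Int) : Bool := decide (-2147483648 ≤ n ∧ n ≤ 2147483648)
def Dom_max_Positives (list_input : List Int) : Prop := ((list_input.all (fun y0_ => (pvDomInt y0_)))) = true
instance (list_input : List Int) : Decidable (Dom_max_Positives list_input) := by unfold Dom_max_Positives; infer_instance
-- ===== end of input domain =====

-- B fuses A's two index passes into one value loop over the list (same O(n), one pass instead of two).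

-- ===== PORT A =====
-- two loops over range(len(list_input)), indexing list_input[i]
def max_Positives (list_input : List Int) : Int × Int :=
  let max_positive : Int := 0
  let max_positive : Int :=
    (PySem.List.pyRange 0 list_input.length 1).foldl
      (fun m i =>
        if PySem.List.pyGetD list_input i 0 > 0 ∧ PySem.List.pyGetD list_input i 0 > m
        then PySem.List.pyGetD list_input i 0 else m) max_positive
  let max_items_count : Int :=
    (PySem.List.pyRange 0 list_input.length 1).foldl
      (fun c i =>
        if max_positive ≠ 0 ∧ PySem.List.pyGetD list_input i 0 = max_positive
        then c + 1 else c) 0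
  (max_positive, max_items_count)

-- ===== PORT B =====
-- single pass carrying (max_positive, max_items_count)
def max_Positives_alt (list_input : List Int) : Int × Int :=
  list_input.foldl
    (fun s x =>
      if x > 0 ∧ x > s.1 then (x, 1)
      else if s.1 ≠ 0 ∧ x = s.1 then (s.1, s.2 + 1)
      else s)
    (0, 0)

-- ===== PRECONDITION & SPEC =====
def Spec_max_Positives (list_input : List Int) (out : Int × Int) : Prop := out = max_Positives_alt list_input
instance (list_input : List Int) (out : Int × Int) : Decidable (Spec_max_Positives list_input out) := by unfold Spec_max_Positives; infer_instance

-- ===== CLAIM (what is proved, stated in full; the proofs are below) =====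
def Claim_equal_max_Positives : Prop := ∀ (list_input : List Int), Dom_max_Positives list_input → Spec_max_Positives list_input (max_Positives list_input)

-- ===== LEMMAS AND PROOFS =====

def pvAmax (l : List Int) (m : Int) : Int :=
  l.foldl (fun m x => if x > 0 ∧ x > m then x else m) m

theorem pvAmax_ge (l : List Int) (m : Int) : m ≤ pvAmax l m := by
  induction l generalizing m with
  | nil => simp [pvAmax]
  | cons x t ih =>
    simp only [pvAmax, List.foldl_cons]
    split_ifs with h
    · exact le_trans (le_of_lt h.2) (ih x)
    · exact ih m

-- A's second loop counts occurrences of m (guarded by m ≠ 0)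
theorem pvAcount_eq (l : List Int) (m c : Int) :
    l.foldl (fun c x => if m ≠ 0 ∧ x = m then c + 1 else c) c
      = c + (if m = 0 then 0 else (l.count m : Int)) := by
  induction l generalizing c with
  | nil => simp
  | cons x t ih =>
    simp only [List.foldl_cons, ih, List.count_cons]
    by_cases hm : m = 0
    · simp [hm]
    · by_cases hx : x = m <;> simp [hm, hx] <;> omega

-- invariant of B's single pass, for a state whose count component is c and max component m ≥ 0
theorem pvB_inv (l : List Int) (m c : Int) (hm : 0 ≤ m) :
    l.foldl
      (fun s x =>
        if x > 0 ∧ x > s.1 then (x, 1)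
        else if s.1 ≠ 0 ∧ x = s.1 then (s.1, s.2 + 1)
        else s)
      (m, c)
      = (pvAmax l m,
         if pvAmax l m = m then (if m = 0 then c else c + (l.count m : Int))
         else (l.count (pvAmax l m) : Int)) := by
  induction l generalizing m c with
  | nil => simp [pvAmax]
  | cons x t ih =>
    simp only [List.foldl_cons]
    by_cases h1 : x > 0 ∧ x > m
    · rw [if_pos h1, ih x 1 (le_of_lt h1.1)]
      have hMx : x ≤ pvAmax t x := pvAmax_ge t x
      have hMm : pvAmax (x :: t) m = pvAmax t x := by
        simp [pvAmax, h1]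
      have hne : pvAmax (x :: t) m ≠ m := by
        rw [hMm]; omega
      rw [hMm] at *
      rw [if_neg hne]
      by_cases hx : pvAmax t x = x
      · have hx0 : x ≠ 0 := by omega
        simp [hx, hx0]
        omega
      · have : x ≠ pvAmax t x := fun h => hx h.symm
        simp [if_neg hx, this]
    · rw [if_neg h1]
      have hMm : pvAmax (x :: t) m = pvAmax t m := by simp [pvAmax, h1]
      have hge : m ≤ pvAmax t m := pvAmax_ge t m
      by_cases h2 : m ≠ 0 ∧ x = m
      · rw [if_pos h2, ih m (c+1) hm, hMm]
        by_cases hEq : pvAmax t m = m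
        · simp [hEq, h2.1, h2.2]
          omega
        · have hgt : m < pvAmax t m := lt_of_le_of_ne hge (fun h => hEq h.symm)
          have hxne : x ≠ pvAmax t m := by omega
          simp [hEq, hxne]
      · rw [if_neg h2, ih m c hm, hMm]
        by_cases hEq : pvAmax t m = m
        · by_cases hm0 : m = 0
          · subst hm0; simp [hEq]
          · have hxm : x ≠ m := by tauto
            simp [hEq, hm0, hxm]
        · have hgt : m < pvAmax t m := lt_of_le_of_ne hge (fun h => hEq h.symm)
          have hxne : x ≠ pvAmax t m := by
            rcases not_and_or.mp h1 with h | h <;> omega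
          simp [hEq, hxne]

-- ===== VERDICT (by name: the statement is the Claim_ definition above) =====
theorem max_Positives_spec : Claim_equal_max_Positives := by
  intro l _
  unfold Spec_max_Positives max_Positives max_Positives_alt
  dsimp only
  rw [show ((l.length : Nat) : Int) = PySem.List.len l from rfl]
  rw [PySem.List.foldl_pyRange_zero_pyGetD l 0
        (fun m x => if x > 0 ∧ x > m then x else m) 0]
  rw [show (List.foldl (fun m x => if x > 0 ∧ x > m then x else m) 0 l) = pvAmax l 0
        from rfl]
  rw [PySem.List.foldl_pyRange_zero_pyGetD l 0
        (fun c x => if pvAmax l 0 ≠ 0 ∧ x = pvAmax l 0 then c + 1 else c) 0]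
  rw [pvB_inv l 0 0 le_rfl, pvAcount_eq]
  have := pvAmax_ge l 0
  show (pvAmax l 0, _) = _
  by_cases h : pvAmax l 0 = 0 <;> simp [h]
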